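-- pv_equiv track=rewrite | github.com/Morebenk/zone-pattern-builder | field_formats.py | auto_detect_format
-- ===== SOURCE A (Python) =====
-- def auto_detect_format(field_name: str) -> str:
--     """
--     Auto-detect format based on field name patterns
--
--     Args:
--         field_name: The name of the field
--
--     Returns:
--         Detected format type (date, height, weight, sex, eyes, hair, or string as default)
--
--     Examples:
--         auto_detect_format("date_of_birth") → "date"
--         auto_detect_format("expiration_date") → "date"
--         auto_detect_format("height") → "height"
--         auto_detect_format("sex") → "sex"
--         auto_detect_format("eyes") → "eyes"
--         auto_detect_format("hair") → "hair"
--         auto_detect_format("first_name") → "string"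
--     """
--     field_lower = field_name.lower()
--
--     # Date fields
--     if 'date' in field_lower:
--         return 'date'
--
--     # Height fields
--     if 'height' in field_lower or field_lower in ['hgt', 'ht']:
--         return 'height'
--
--     # Weight fields
--     if 'weight' in field_lower or field_lower in ['wgt', 'wt']:
--         return 'weight'
--
--     # Sex/gender fields
--     if field_lower in ['sex', 'gender']:
--         return 'sex'
--
--     # Eye color fields
--     if 'eye' in field_lower or field_lower in ['eyes', 'eye_color', 'eye_colour']:
--         return 'eyes'
--
--     # Hair color fields
--     if 'hair' in field_lower or field_lower in ['hair', 'hair_color', 'hair_colour']: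
--         return 'hair'
--
--     # Number/code fields
--     if any(keyword in field_lower for keyword in ['number', 'code', 'dl', 'license']):
--         return 'number'
--
--     # Default to string
--     return 'string'
-- ===== SOURCE B (Python) =====
-- # B: instead of A's chained if-checks with early return, gather ALL matching
-- # format candidates in one comprehension (substring hits plus an exact-match
-- # table lookup) and pick the highest-priority one with min().
-- _PRIORITY = {"date": 0, "height": 1, "weight": 2, "sex": 3, "eyes": 4, "hair": 5, "number": 6}
--
-- _SUBSTRINGS = [("date", "date"), ("height", "height"), ("weight", "weight"),
--                ("eye", "eyes"), ("hair", "hair"),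
--                ("number", "number"), ("code", "number"), ("dl", "number"), ("license", "number")]
--
-- _EXACTS = {"hgt": "height", "ht": "height", "wgt": "weight", "wt": "weight",
--            "sex": "sex", "gender": "sex",
--            "eyes": "eyes", "eye_color": "eyes", "eye_colour": "eyes",
--            "hair_color": "hair", "hair_colour": "hair"}
--
-- def auto_detect_format(field_name: str) -> str:
--     field_lower = field_name.lower()
--     candidates = [fmt for sub, fmt in _SUBSTRINGS if sub in field_lower]
--     if field_lower in _EXACTS:
--         candidates.append(_EXACTS[field_lower])
--     return min(candidates, key=_PRIORITY.get, default="string")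
-- ===== Notes on version B (the rewrite author's own statement) =====
-- stated objective: alternative
-- what changed: Instead of A's ordered if-chain with early return, B collects ALL matching format candidates (substring hits plus an exact-match table lookup) and selects the winner with min() over a priority map, with the default format when nothing matches.
import Mathlib
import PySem

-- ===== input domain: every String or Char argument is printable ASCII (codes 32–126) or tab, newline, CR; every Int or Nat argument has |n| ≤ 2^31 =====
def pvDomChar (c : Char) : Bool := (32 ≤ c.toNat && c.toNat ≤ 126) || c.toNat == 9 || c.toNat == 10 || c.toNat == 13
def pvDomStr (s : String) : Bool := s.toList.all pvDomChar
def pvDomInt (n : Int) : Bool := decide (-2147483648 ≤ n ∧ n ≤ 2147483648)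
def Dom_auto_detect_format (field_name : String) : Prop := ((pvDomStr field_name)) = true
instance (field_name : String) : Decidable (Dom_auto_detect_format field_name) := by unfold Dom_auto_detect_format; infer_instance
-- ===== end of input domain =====

-- B gathers all matching format candidates and picks the highest-priority one with min(); same results as A's first-match if-chain (objective: alternative decomposition).

-- ===== PORT A =====
-- Literal transliteration of A's if-chain.
def auto_detect_format (field_name : String) : String :=
  let field_lower := PySem.Str.lower field_name
  if PySem.Str.isIn "date" field_lower then "date"
  else if PySem.Str.isIn "height" field_lower || ["hgt", "ht"].contains field_lower then "height"
  else if PySem.Str.isIn "weight" field_lower || ["wgt", "wt"].contains field_lower then "weight"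
  else if ["sex", "gender"].contains field_lower then "sex"
  else if PySem.Str.isIn "eye" field_lower || ["eyes", "eye_color", "eye_colour"].contains field_lower then "eyes"
  else if PySem.Str.isIn "hair" field_lower || ["hair", "hair_color", "hair_colour"].contains field_lower then "hair"
  else if ["number", "code", "dl", "license"].any (fun keyword => PySem.Str.isIn keyword field_lower) then "number"
  else "string"

-- ===== PORT B =====
def pvPrio : PySem.Dict String Int :=
  PySem.Dict.ofList [("date", 0), ("height", 1), ("weight", 2), ("sex", 3), ("eyes", 4), ("hair", 5), ("number", 6)]

def pvSubRules : List (String × String) :=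
  [("date", "date"), ("height", "height"), ("weight", "weight"),
   ("eye", "eyes"), ("hair", "hair"),
   ("number", "number"), ("code", "number"), ("dl", "number"), ("license", "number")]

def pvExacts : PySem.Dict String String :=
  PySem.Dict.ofList
    [("hgt", "height"), ("ht", "height"), ("wgt", "weight"), ("wt", "weight"),
     ("sex", "sex"), ("gender", "sex"),
     ("eyes", "eyes"), ("eye_color", "eyes"), ("eye_colour", "eyes"),
     ("hair_color", "hair"), ("hair_colour", "hair")]

-- B: collect every matching candidate, then min() by priority (default "string").
-- _PRIORITY.get never returns None on a candidate (all candidates are keys), so getD with any default is exact here.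
def auto_detect_format_alt (field_name : String) : String :=
  let field_lower := PySem.Str.lower field_name
  let candidates := (pvSubRules.filter (fun p => PySem.Str.isIn p.1 field_lower)).map (fun p => p.2)
  let candidates :=
    match PySem.Dict.get? pvExacts field_lower with
    | some f => candidates ++ [f]
    | none => candidates
  PySem.List.minD candidates (fun f => PySem.Dict.getD pvPrio f 0) "string"

-- ===== PRECONDITION & SPEC =====
def Spec_auto_detect_format (field_name : String) (out : String) : Prop := out = auto_detect_format_alt field_name
instance (field_name : String) (out : String) : Decidable (Spec_auto_detect_format field_name out) := by unfold Spec_auto_detect_format; infer_instance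

-- ===== CLAIM =====
def Claim_equal_auto_detect_format : Prop := ∀ (field_name : String), Dom_auto_detect_format field_name → Spec_auto_detect_format field_name (auto_detect_format field_name)

-- ===== LEMMAS AND PROOFS =====
theorem pv_core (low : String) :
    (if PySem.Str.isIn "date" low then "date"
     else if PySem.Str.isIn "height" low || ["hgt", "ht"].contains low then "height"
     else if PySem.Str.isIn "weight" low || ["wgt", "wt"].contains low then "weight"
     else if ["sex", "gender"].contains low then "sex"
     else if PySem.Str.isIn "eye" low || ["eyes", "eye_color", "eye_colour"].contains low then "eyes"
     else if PySem.Str.isIn "hair" low || ["hair", "hair_color", "hair_colour"].contains low then "hair"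
     else if ["number", "code", "dl", "license"].any (fun keyword => PySem.Str.isIn keyword low) then "number"
     else "string") =
    (PySem.List.minD
      ((match PySem.Dict.get? pvExacts low with
        | some f => ((pvSubRules.filter (fun p => PySem.Str.isIn p.1 low)).map (fun p => p.2)) ++ [f]
        | none => (pvSubRules.filter (fun p => PySem.Str.isIn p.1 low)).map (fun p => p.2))
       )
      (fun f => PySem.Dict.getD pvPrio f 0) "string") := by
  by_cases e1 : "hgt" = low; · subst e1; decide
  by_cases e2 : "ht" = low; · subst e2; decide
  by_cases e3 : "wgt" = low; · subst e3; decide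
  by_cases e4 : "wt" = low; · subst e4; decide
  by_cases e5 : "sex" = low; · subst e5; decide
  by_cases e6 : "gender" = low; · subst e6; decide
  by_cases e7 : "eyes" = low; · subst e7; decide
  by_cases e8 : "eye_color" = low; · subst e8; decide
  by_cases e9 : "eye_colour" = low; · subst e9; decide
  by_cases e10 : "hair_color" = low; · subst e10; decide
  by_cases e11 : "hair_colour" = low; · subst e11; decide
  by_cases e12 : "hair" = low
  · subst e12; decide
  have hnone : PySem.Dict.get? pvExacts low = none := by
    have hE : pvExacts = PySem.Dict.mk
      [("hgt", "height"), ("ht", "height"), ("wgt", "weight"), ("wt", "weight"),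
       ("sex", "sex"), ("gender", "sex"),
       ("eyes", "eyes"), ("eye_color", "eyes"), ("eye_colour", "eyes"),
       ("hair_color", "hair"), ("hair_colour", "hair")] := by rfl
    rw [hE]
    simp [PySem.Dict.get?_mk_cons, PySem.Dict.get?, e1, e2, e3, e4, e5, e6, e7, e8, e9, e10, e11]
  rw [hnone]
  have h1' : low ≠ "hgt" := fun h => e1 h.symm
  have h2' : low ≠ "ht" := fun h => e2 h.symm
  have h3' : low ≠ "wgt" := fun h => e3 h.symm
  have h4' : low ≠ "wt" := fun h => e4 h.symm
  have h5' : low ≠ "sex" := fun h => e5 h.symm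
  have h6' : low ≠ "gender" := fun h => e6 h.symm
  have h7' : low ≠ "eyes" := fun h => e7 h.symm
  have h8' : low ≠ "eye_color" := fun h => e8 h.symm
  have h9' : low ≠ "eye_colour" := fun h => e9 h.symm
  have h10' : low ≠ "hair_color" := fun h => e10 h.symm
  have h11' : low ≠ "hair_colour" := fun h => e11 h.symm
  have h12' : low ≠ "hair" := fun h => e12 h.symm
  simp only [pvSubRules, List.filter_cons, List.filter_nil, List.contains_cons,
    List.contains_nil, List.any_cons, List.any_nil, List.elem_eq_mem, List.mem_cons,
    List.mem_singleton, List.not_mem_nil, decide_eq_true_eq, h1', h2', h3', h4', h5', h6',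
    h7', h8', h9', h10', h11', h12', or_false, false_or, Bool.or_false, Bool.false_or,
    decide_false, decide_true]
  generalize PySem.Str.isIn "date" low = b1
  generalize PySem.Str.isIn "height" low = b2
  generalize PySem.Str.isIn "weight" low = b3
  generalize PySem.Str.isIn "eye" low = b4
  generalize PySem.Str.isIn "hair" low = b5
  generalize PySem.Str.isIn "number" low = b6
  generalize PySem.Str.isIn "code" low = b7
  generalize PySem.Str.isIn "dl" low = b8
  generalize PySem.Str.isIn "license" low = b9
  cases b1 <;> cases b2 <;> cases b3 <;> cases b4 <;> cases b5 <;>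
    cases b6 <;> cases b7 <;> cases b8 <;> cases b9 <;> decide

-- ===== VERDICT =====
theorem auto_detect_format_spec : Claim_equal_auto_detect_format := by
  intro field_name _
  show _ = _
  simp only [auto_detect_format, auto_detect_format_alt]
  exact pv_core (PySem.Str.lower field_name)
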